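-- pv_equiv track=rewrite | github.com/WangyLab/HighEntropyAlloy_Processing | MD_scripts/GetMetalNumRatio.py | merge_symmetric_combinations_with_count
-- ===== SOURCE A (Python) =====
-- def generate_square_symmetric_variants(combo):
--     """
--     Generate all possible rotations and reflections (flips) of a 2x2 square represented by 'combo'.
--     The combo is assumed to be in the order of a 2x2 matrix: [A, B, C, D]
--     """
--     if len(combo) != 8:  # Each element is assumed to be 2 characters long
--         return set()
--
--     # Splitting the combo into individual elements
--     A, B, C, D = combo[0:2], combo[2:4], combo[4:6], combo[6:8]  # Assuming combo is like 'ABCD'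
--
--     # Generating rotations and flips
--     rotations_and_flips = {
--         A + B + C + D,  # Original
--         B + C + D + A,  # Rotated 90 degrees clockwise
--         D + C + B + A,  # Rotated 180 degrees
--         C + B + A + D,  # Rotated 270 degrees clockwise
--         C + D + A + B,  # Horizontally flipped
--         A + D + C + B,  # Vertically flipped
--         D + A + B + C,  # Diagonal flip (top-left to bottom-right)
--         B + A + D + C   # Diagonal flip (top-right to bottom-left)
--     }
--
--     return rotations_and_flips
--
-- def merge_symmetric_combinations_with_count(combinations):
--     """
--     Merge combinations that are the same due to the symmetry of a 2x2 square (rotations and flips),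
--     and count the occurrences of each unique combination including its symmetric variants.
--     """
--     combination_counts = {}
--
--     for combo in combinations:
--         # Check if the combo length is correct
--         if len(combo) != 8:
--             continue
--
--         # Generate all symmetric variants of the current combination
--         variants = generate_square_symmetric_variants(combo)
--
--         # Find if any variant is already in the combination_counts
--         found_variant = None
--         for variant in variants:
--             if variant in combination_counts:
--                 found_variant = variant
--                 break
--
--         if found_variant:
--             # If a variant is found in the counts, increment its count
--             combination_counts[found_variant] += 1
--         else:
--             # Otherwise, add the current combination as a new entry with count 1
--             combination_counts[combo] = 1
--
--     return combination_counts
-- ===== SOURCE B (Python) =====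
-- def generate_square_symmetric_variants(combo):
--     """Generate all rotations and reflections of a 2x2 square combo string."""
--     if len(combo) != 8:
--         return set()
--     A, B, C, D = combo[0:2], combo[2:4], combo[4:6], combo[6:8]
--     return {
--         A + B + C + D,
--         B + C + D + A,
--         D + C + B + A,
--         C + B + A + D,
--         C + D + A + B,
--         A + D + C + B,
--         D + A + B + C,
--         B + A + D + C,
--     }
--
-- def merge_symmetric_combinations_with_count(combinations):
--     """Count combos up to 2x2 square symmetry via a canonical-form index:
--     canonical form -> first-seen representative, so no per-combo scan of
--     the result dict is needed."""
--     counts = {}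
--     index = {}  # canonical variant -> the key stored in counts for its class
--     for combo in combinations:
--         if len(combo) != 8:
--             continue
--         canon = min(generate_square_symmetric_variants(combo))
--         key = index.get(canon)
--         if key is None:
--             index[canon] = combo
--             counts[combo] = 1
--         else:
--             counts[key] += 1
--     return counts
-- ===== Notes on version B (the rewrite author's own statement) =====
-- stated objective: alternative
-- what changed: Replaces A's per-combo scan of all 8 symmetric variants against the result dict by a canonical-form index: each combo is reduced to the minimum of its variants and a second dict maps canonical form -> first-seen representative, so membership in an equivalence class is one lookup instead of an 8-way scan.
import Mathlib
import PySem

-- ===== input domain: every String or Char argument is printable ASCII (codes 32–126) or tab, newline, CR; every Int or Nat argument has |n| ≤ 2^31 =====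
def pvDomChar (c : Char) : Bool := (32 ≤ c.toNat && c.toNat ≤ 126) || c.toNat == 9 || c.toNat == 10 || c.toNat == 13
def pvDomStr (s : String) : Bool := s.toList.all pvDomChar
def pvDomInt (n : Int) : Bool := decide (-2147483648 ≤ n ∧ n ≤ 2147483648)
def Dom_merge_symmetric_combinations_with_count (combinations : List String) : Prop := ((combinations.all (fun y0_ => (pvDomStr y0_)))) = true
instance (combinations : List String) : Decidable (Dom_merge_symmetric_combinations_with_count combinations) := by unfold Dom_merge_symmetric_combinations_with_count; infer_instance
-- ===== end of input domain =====

-- B replaces A's 8-way variant scan of the result dict by a canonical-form index (alternative decomposition, same cost class).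

-- ===== PORT A =====
-- shared module helper (both Pythons define it identically): all rotations/reflections of the 2x2 square
def generate_square_symmetric_variants (combo : String) : PySem.Set String :=
  if PySem.Str.len combo ≠ 8 then PySem.Set.empty
  else
    -- combo[0:2], combo[2:4], combo[4:6], combo[6:8]; '+' on str = List Char append under String.mk
    let s := combo.toList
    let a := PySem.Chars.slice s (some 0) (some 2)
    let b := PySem.Chars.slice s (some 2) (some 4)
    let c := PySem.Chars.slice s (some 4) (some 6)
    let d := PySem.Chars.slice s (some 6) (some 8)
    PySem.Set.ofList [String.ofList (a ++ b ++ c ++ d), String.ofList (b ++ c ++ d ++ a), String.ofList (d ++ c ++ b ++ a), String.ofList (c ++ b ++ a ++ d),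
                      String.ofList (c ++ d ++ a ++ b), String.ofList (a ++ d ++ c ++ b), String.ofList (d ++ a ++ b ++ c), String.ofList (b ++ a ++ d ++ c)]

-- loop body of A: scan the variants for one already present, increment it, else insert combo
def pvStepA (counts : PySem.Dict String Int) (combo : String) : PySem.Dict String Int :=
  if PySem.Str.len combo ≠ 8 then counts
  else
    match (generate_square_symmetric_variants combo).find? (fun v => counts.contains v) with
    | some fv => counts.modify fv 0 (· + 1)
    | none => counts.insert combo 1

def merge_symmetric_combinations_with_count (combinations : List String) : List (String × Int) :=
  (combinations.foldl pvStepA PySem.Dict.empty).items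

-- ===== PORT B =====
-- loop body of B: canonical form = min of the variants; index : canonical -> stored key
def pvStepB (st : PySem.Dict String Int × PySem.Dict String String) (combo : String) :
    PySem.Dict String Int × PySem.Dict String String :=
  if PySem.Str.len combo ≠ 8 then st
  else
    match PySem.List.min? (generate_square_symmetric_variants combo) (fun x => x) with
    | none => st  -- unreachable: a length-8 combo always has variants
    | some canon =>
      match st.2.get? canon with
      | some key => (st.1.modify key 0 (· + 1), st.2)
      | none => (st.1.insert combo 1, st.2.insert canon combo)

def merge_symmetric_combinations_with_count_alt (combinations : List String) : List (String × Int) :=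
  (combinations.foldl pvStepB (PySem.Dict.empty, PySem.Dict.empty)).1.items

-- ===== PRECONDITION & SPEC =====
def Spec_merge_symmetric_combinations_with_count (combinations : List String) (out : List (String × Int)) : Prop := out = merge_symmetric_combinations_with_count_alt combinations
instance (combinations : List String) (out : List (String × Int)) : Decidable (Spec_merge_symmetric_combinations_with_count combinations out) := by unfold Spec_merge_symmetric_combinations_with_count; infer_instance

-- ===== CLAIM (what is proved, stated in full; the proofs are below) =====
def Claim_equal_merge_symmetric_combinations_with_count : Prop := ∀ (combinations : List String), Dom_merge_symmetric_combinations_with_count combinations → Spec_merge_symmetric_combinations_with_count combinations (merge_symmetric_combinations_with_count combinations)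

-- ===== LEMMAS AND PROOFS =====

-- the canonical representative of a combo's symmetry class: min of its variants
def pvCanon (s : String) : String :=
  (PySem.List.min? (generate_square_symmetric_variants s) (fun x => x)).getD ""

-- loop invariant: the index dict is exactly (canon k, k) over counts' keys, keys have length 8,
-- and distinct keys lie in distinct symmetry classes
def pvInv (d : PySem.Dict String Int) (idx : PySem.Dict String String) : Prop :=
  idx = PySem.Dict.mk (d.keys.map (fun k => (pvCanon k, k))) ∧
  (∀ k ∈ d.keys, PySem.Str.len k = 8) ∧
  (d.keys.map pvCanon).Nodup

theorem pvExistsChars (u : String) (h : PySem.Str.len u = 8) :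
    ∃ c1 c2 c3 c4 c5 c6 c7 c8 : Char, u = String.ofList [c1,c2,c3,c4,c5,c6,c7,c8] := by
  have hl : u.toList.length = 8 := by
    have h' := h; simp only [PySem.Str.len_eq] at h'; exact_mod_cast h'
  obtain ⟨a1, l, hl1⟩ := List.exists_cons_of_length_eq_add_one (l := u.toList) (n := 7) (by omega)
  rw [hl1] at hl; simp at hl
  obtain ⟨a2, l, rfl⟩ := List.exists_cons_of_length_eq_add_one (l := l) (n := 6) (by omega)
  simp at hl
  obtain ⟨a3, l, rfl⟩ := List.exists_cons_of_length_eq_add_one (l := l) (n := 5) (by omega)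
  simp at hl
  obtain ⟨a4, l, rfl⟩ := List.exists_cons_of_length_eq_add_one (l := l) (n := 4) (by omega)
  simp at hl
  obtain ⟨a5, l, rfl⟩ := List.exists_cons_of_length_eq_add_one (l := l) (n := 3) (by omega)
  simp at hl
  obtain ⟨a6, l, rfl⟩ := List.exists_cons_of_length_eq_add_one (l := l) (n := 2) (by omega)
  simp at hl
  obtain ⟨a7, l, rfl⟩ := List.exists_cons_of_length_eq_add_one (l := l) (n := 1) (by omega)
  simp at hl
  obtain ⟨a8, l, rfl⟩ := List.exists_cons_of_length_eq_add_one (l := l) (n := 0) (by omega)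
  simp at hl
  subst hl
  exact ⟨a1, a2, a3, a4, a5, a6, a7, a8, by rw [← hl1, String.ofList_toList]⟩

theorem pvGenChars (c1 c2 c3 c4 c5 c6 c7 c8 : Char) :
    generate_square_symmetric_variants (String.ofList [c1,c2,c3,c4,c5,c6,c7,c8]) =
    PySem.Set.ofList [String.ofList [c1,c2,c3,c4,c5,c6,c7,c8], String.ofList [c3,c4,c5,c6,c7,c8,c1,c2],
                      String.ofList [c7,c8,c5,c6,c3,c4,c1,c2], String.ofList [c5,c6,c3,c4,c1,c2,c7,c8],
                      String.ofList [c5,c6,c7,c8,c1,c2,c3,c4], String.ofList [c1,c2,c7,c8,c5,c6,c3,c4],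
                      String.ofList [c7,c8,c1,c2,c3,c4,c5,c6], String.ofList [c3,c4,c1,c2,c7,c8,c5,c6]] := by
  rw [generate_square_symmetric_variants, if_neg (by simp [PySem.Str.len_eq])]
  rw [String.toList_ofList]; rfl

theorem pvMemGenIff (c1 c2 c3 c4 c5 c6 c7 c8 : Char) (x : String) :
    x ∈ generate_square_symmetric_variants (String.ofList [c1,c2,c3,c4,c5,c6,c7,c8]) ↔
      (x = String.ofList [c1,c2,c3,c4,c5,c6,c7,c8] ∨ x = String.ofList [c3,c4,c5,c6,c7,c8,c1,c2] ∨
       x = String.ofList [c7,c8,c5,c6,c3,c4,c1,c2] ∨ x = String.ofList [c5,c6,c3,c4,c1,c2,c7,c8] ∨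
       x = String.ofList [c5,c6,c7,c8,c1,c2,c3,c4] ∨ x = String.ofList [c1,c2,c7,c8,c5,c6,c3,c4] ∨
       x = String.ofList [c7,c8,c1,c2,c3,c4,c5,c6] ∨ x = String.ofList [c3,c4,c1,c2,c7,c8,c5,c6]) := by
  rw [pvGenChars]
  rw [PySem.Set.mem_ofList]
  simp

-- the dihedral-orbit closure: a variant's variant set has the same members
set_option maxHeartbeats 1000000 in
theorem pvGenCongr (c1 c2 c3 c4 c5 c6 c7 c8 : Char) (v : String)
    (hv : v ∈ generate_square_symmetric_variants (String.ofList [c1,c2,c3,c4,c5,c6,c7,c8])) :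
    ∀ x, x ∈ generate_square_symmetric_variants v ↔
         x ∈ generate_square_symmetric_variants (String.ofList [c1,c2,c3,c4,c5,c6,c7,c8]) := by
  intro x
  rw [pvMemGenIff] at hv
  rcases hv with rfl | rfl | rfl | rfl | rfl | rfl | rfl | rfl <;>
    simp only [pvMemGenIff] <;> tauto

theorem pvMin?Congr (l1 l2 : List String) (h : ∀ x, x ∈ l1 ↔ x ∈ l2) :
    PySem.List.min? l1 (fun x => x) = PySem.List.min? l2 (fun x => x) := by
  rcases e1 : PySem.List.min? l1 (fun x => x) with _ | m1 <;>
    rcases e2 : PySem.List.min? l2 (fun x => x) with _ | m2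
  · rfl
  · rw [PySem.List.min?_eq_none_iff] at e1
    have := (h m2).mpr (PySem.List.min?_mem e2)
    simp [e1] at this
  · rw [PySem.List.min?_eq_none_iff] at e2
    have := (h m1).mp (PySem.List.min?_mem e1)
    simp [e2] at this
  · have h1 := PySem.List.min?_isMin e1 m2 ((h m2).mpr (PySem.List.min?_mem e2))
    have h2 := PySem.List.min?_isMin e2 m1 ((h m1).mp (PySem.List.min?_mem e1))
    simp only [Option.some.injEq]
    exact le_antisymm h1 h2

theorem pvCanonEqOfMem (c1 c2 c3 c4 c5 c6 c7 c8 : Char) (v : String)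
    (hv : v ∈ generate_square_symmetric_variants (String.ofList [c1,c2,c3,c4,c5,c6,c7,c8])) :
    pvCanon v = pvCanon (String.ofList [c1,c2,c3,c4,c5,c6,c7,c8]) := by
  unfold pvCanon
  rw [pvMin?Congr _ _ (pvGenCongr c1 c2 c3 c4 c5 c6 c7 c8 v hv)]

theorem pvSelfMemGen (c1 c2 c3 c4 c5 c6 c7 c8 : Char) :
    String.ofList [c1,c2,c3,c4,c5,c6,c7,c8] ∈
      generate_square_symmetric_variants (String.ofList [c1,c2,c3,c4,c5,c6,c7,c8]) := by
  rw [pvMemGenIff]; left; rfl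

theorem pvCanonMemGen (u : String) (h : PySem.Str.len u = 8) :
    pvCanon u ∈ generate_square_symmetric_variants u := by
  obtain ⟨c1, c2, c3, c4, c5, c6, c7, c8, rfl⟩ := pvExistsChars u h
  rcases e : PySem.List.min? (generate_square_symmetric_variants (String.ofList [c1,c2,c3,c4,c5,c6,c7,c8])) (fun x => x) with _ | m
  · rw [PySem.List.min?_eq_none_iff] at e
    have := pvSelfMemGen c1 c2 c3 c4 c5 c6 c7 c8
    simp [e] at this
  · have hm := PySem.List.min?_mem e
    simpa [pvCanon, e] using hm

theorem pvMemGenOfCanonEq (u v : String) (hu : PySem.Str.len u = 8) (hv : PySem.Str.len v = 8)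
    (h : pvCanon v = pvCanon u) : v ∈ generate_square_symmetric_variants u := by
  obtain ⟨a1, a2, a3, a4, a5, a6, a7, a8, rfl⟩ := pvExistsChars u hu
  obtain ⟨b1, b2, b3, b4, b5, b6, b7, b8, rfl⟩ := pvExistsChars v hv
  have hcu := pvCanonMemGen _ hu
  have hcv := pvCanonMemGen _ hv
  rw [h] at hcv
  -- the variants of the shared canonical form coincide with those of u and of v
  have h1 := pvGenCongr a1 a2 a3 a4 a5 a6 a7 a8 _ hcu
  have h2 := pvGenCongr b1 b2 b3 b4 b5 b6 b7 b8 _ hcv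
  have hself := pvSelfMemGen b1 b2 b3 b4 b5 b6 b7 b8
  exact (h1 _).mp ((h2 _).mpr hself)

theorem pvFind?Unique {α : Type} (l : List α) (p : α → Bool) (k : α) (hk : k ∈ l) (hp : p k = true)
    (hu : ∀ x ∈ l, p x = true → x = k) : l.find? p = some k := by
  induction l with
  | nil => simp at hk
  | cons a t ih =>
    by_cases ha : p a = true
    · rw [List.find?_cons_of_pos ha, hu a List.mem_cons_self ha]
    · rw [List.find?_cons_of_neg ha]
      rcases List.mem_cons.mp hk with rfl | hk'
      · exact absurd hp ha
      · exact ih hk' (fun x hx => hu x (List.mem_cons_of_mem a hx))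

theorem pvGet?MkMap (ks : List String) (c : String) :
    (PySem.Dict.mk (ks.map (fun k => (pvCanon k, k)))).get? c = ks.find? (fun k => pvCanon k == c) := by
  induction ks with
  | nil => rfl
  | cons a t ih =>
    simp only [List.map_cons]
    rw [PySem.Dict.get?_mk_cons, List.find?_cons]
    cases h : pvCanon a == c
    · simp [ih]
    · simp

theorem pvStepLemma (d : PySem.Dict String Int) (idx : PySem.Dict String String) (combo : String)
    (hInv : pvInv d idx) :
    (pvStepB (d, idx) combo).1 = pvStepA d combo ∧
      pvInv (pvStepA d combo) (pvStepB (d, idx) combo).2 := by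
  obtain ⟨hidx, hkeylen, hnodup⟩ := hInv
  by_cases hlen : PySem.Str.len combo = 8
  swap
  · unfold pvStepA pvStepB
    rw [if_pos hlen, if_pos hlen]
    exact ⟨rfl, hidx, hkeylen, hnodup⟩
  · obtain ⟨c1, c2, c3, c4, c5, c6, c7, c8, hchars⟩ := pvExistsChars combo hlen
    have hself : combo ∈ generate_square_symmetric_variants combo := by
      rw [hchars]; exact pvSelfMemGen c1 c2 c3 c4 c5 c6 c7 c8
    obtain ⟨c, hc⟩ : ∃ c, PySem.List.min? (generate_square_symmetric_variants combo) (fun x => x) = some c := by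
      rcases e : PySem.List.min? (generate_square_symmetric_variants combo) (fun x => x) with _ | m
      · rw [PySem.List.min?_eq_none_iff] at e
        rw [e] at hself; simp at hself
      · exact ⟨m, rfl⟩
    have hcanon : pvCanon combo = c := by simp [pvCanon, hc]
    -- canon of any variant of combo is c
    have hcvar : ∀ x ∈ generate_square_symmetric_variants combo, pvCanon x = c := by
      intro x hx
      rw [← hcanon, hchars]
      exact pvCanonEqOfMem c1 c2 c3 c4 c5 c6 c7 c8 x (by rwa [hchars] at hx)
    have hget : idx.get? c = d.keys.find? (fun k => pvCanon k == c) := by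
      rw [hidx, pvGet?MkMap]
    unfold pvStepA pvStepB
    rw [if_neg (not_not_intro hlen), if_neg (not_not_intro hlen)]
    simp only [hc]
    rcases e : d.keys.find? (fun k => pvCanon k == c) with _ | k
    · -- no key in this class yet: A's scan fails, B inserts
      have hnone : ∀ x ∈ generate_square_symmetric_variants combo, d.contains x = false := by
        intro x hx
        by_contra hcon
        have hx' : x ∈ d.keys := (PySem.Dict.contains_iff_mem_keys d x).mp (by
          cases h : d.contains x
          · exact absurd h hcon
          · rfl)
        have := List.find?_eq_none.mp e x hx'
        simp [hcvar x hx] at this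
      have hfind : (generate_square_symmetric_variants combo).find? (fun v => d.contains v) = none :=
        List.find?_eq_none.mpr (fun x hx => by simp [hnone x hx])
      rw [hfind, hget, e]
      have hnotmem : combo ∉ d.keys := fun hmem => by
        have := hnone combo hself
        rw [(PySem.Dict.contains_iff_mem_keys d combo).mpr hmem] at this
        exact absurd this (by simp)
      have hcontains : d.contains combo = false := by
        cases h : d.contains combo
        · rfl
        · exact absurd ((PySem.Dict.contains_iff_mem_keys d combo).mp h) hnotmem
      have hkeys : (d.insert combo 1).keys = d.keys ++ [combo] :=
        PySem.Dict.keys_insert_of_not_contains d 1 hcontains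
      have hcfresh : c ∉ d.keys.map pvCanon := by
        intro hmem
        obtain ⟨k, hk, hkc⟩ := List.mem_map.mp hmem
        have := List.find?_eq_none.mp e k hk
        simp [hkc] at this
      have hidxcontains : idx.contains c = false := by
        rw [PySem.Dict.contains_eq_isSome_get?, hget, e]; rfl
      refine ⟨rfl, ?_, ?_, ?_⟩
      · apply PySem.Dict.ext
        rw [PySem.Dict.items_insert_of_not_contains idx combo hidxcontains]
        rw [hidx, hkeys]
        simp [hcanon]
      · intro k hk
        rw [hkeys] at hk
        rcases List.mem_append.mp hk with h | h
        · exact hkeylen k h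
        · simp at h; subst h; exact hlen
      · rw [hkeys]
        simp only [List.map_append, List.map_cons, List.map_nil, hcanon]
        exact List.nodup_append.mpr ⟨hnodup, List.nodup_singleton c, by simpa using hcfresh⟩
    · -- a key of this class exists: A's scan finds exactly it, B increments it
      have hkfacts : k ∈ d.keys ∧ pvCanon k = c :=
        ⟨List.mem_of_find?_eq_some e, by simpa using List.find?_some e⟩
      have hkV : k ∈ generate_square_symmetric_variants combo := by
        rw [hchars]
        apply pvMemGenOfCanonEq _ k (by rw [← hchars]; exact hlen) (hkeylen k hkfacts.1)
        rw [← hchars, hkfacts.2, hcanon]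
      have hfind : (generate_square_symmetric_variants combo).find? (fun v => d.contains v) = some k := by
        apply pvFind?Unique _ _ k hkV ((PySem.Dict.contains_iff_mem_keys d k).mpr hkfacts.1)
        intro x hx hcx
        apply List.inj_on_of_nodup_map hnodup ((PySem.Dict.contains_iff_mem_keys d x).mp hcx) hkfacts.1
        rw [hcvar x hx, hkfacts.2]
      rw [hfind, hget, e]
      have hkeyseq : (d.modify k 0 (· + 1)).keys = d.keys := by
        rw [PySem.Dict.keys_modify,
            PySem.Dict.keys_insert_of_contains d _ ((PySem.Dict.contains_iff_mem_keys d k).mpr hkfacts.1)]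
      refine ⟨rfl, ?_, ?_, ?_⟩
      · rw [hidx, hkeyseq]
      · intro k' hk'
        rw [hkeyseq] at hk'
        exact hkeylen k' hk'
      · rw [hkeyseq]
        exact hnodup

theorem pvMain : ∀ (l : List String) (d : PySem.Dict String Int) (idx : PySem.Dict String String),
    pvInv d idx →
    (l.foldl pvStepB (d, idx)).1 = l.foldl pvStepA d ∧
      pvInv (l.foldl pvStepA d) (l.foldl pvStepB (d, idx)).2 := by
  intro l
  induction l with
  | nil => intro d idx h; exact ⟨rfl, h⟩
  | cons a t ih =>
    intro d idx h
    have hstep := pvStepLemma d idx a h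
    have hpair : pvStepB (d, idx) a = (pvStepA d a, (pvStepB (d, idx) a).2) := by
      rw [← hstep.1]
    simp only [List.foldl_cons]
    rw [hpair]
    exact ih (pvStepA d a) (pvStepB (d, idx) a).2 hstep.2

-- ===== VERDICT (by name: the statement is the Claim_ definition above) =====
theorem merge_symmetric_combinations_with_count_spec : Claim_equal_merge_symmetric_combinations_with_count := by
  intro combinations _
  unfold Spec_merge_symmetric_combinations_with_count merge_symmetric_combinations_with_count merge_symmetric_combinations_with_count_alt
  have h := pvMain combinations PySem.Dict.empty PySem.Dict.empty
    (by refine ⟨rfl, ?_, ?_⟩ <;> simp [PySem.Dict.keys, PySem.Dict.empty])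
  rw [h.1]
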